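-- pv_equiv track=rewrite | github.com/nathanieluriri/yamFluentBackend | controller/grading/scoring.py | count_fillers
-- ===== SOURCE A (Python) =====
-- from typing import Iterable, List, Set, Tuple
--
-- def count_fillers(tokens: List[str]) -> Tuple[int, int]:
--     filler_words: Set[str] = {"um", "uh", "uhm", "umm", "erm", "hmm", "like"}
--     filler_count = 0
--     i = 0
--     while i < len(tokens):
--         token = tokens[i]
--         if token in filler_words:
--             filler_count += 1
--             i += 1
--             continue
--         if token == "you" and i + 1 < len(tokens) and tokens[i + 1] == "know":
--             filler_count += 1
--             i += 2
--             continue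
--         i += 1
--     return filler_count, len(tokens)
-- ===== SOURCE B (Python) =====
-- def count_fillers(tokens):
--     filler_words = {"um", "uh", "uhm", "umm", "erm", "hmm", "like"}
--     singles = sum(1 for t in tokens if t in filler_words)
--     bigrams = sum(1 for pair in zip(tokens, tokens[1:]) if pair == ("you", "know"))
--     return singles + bigrams, len(tokens)
-- ===== Notes on version B (the rewrite author's own statement) =====
-- stated objective: simpler
-- what changed: Replaces A's manual index walk with variable skips (i+=1/i+=2) by two independent linear passes: a count of single-word fillers plus a count of adjacent ('you','know') pairs via zip; equivalence holds because the bigram's words are not fillers and adjacent ('you','know') pairs cannot overlap.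
import Mathlib
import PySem

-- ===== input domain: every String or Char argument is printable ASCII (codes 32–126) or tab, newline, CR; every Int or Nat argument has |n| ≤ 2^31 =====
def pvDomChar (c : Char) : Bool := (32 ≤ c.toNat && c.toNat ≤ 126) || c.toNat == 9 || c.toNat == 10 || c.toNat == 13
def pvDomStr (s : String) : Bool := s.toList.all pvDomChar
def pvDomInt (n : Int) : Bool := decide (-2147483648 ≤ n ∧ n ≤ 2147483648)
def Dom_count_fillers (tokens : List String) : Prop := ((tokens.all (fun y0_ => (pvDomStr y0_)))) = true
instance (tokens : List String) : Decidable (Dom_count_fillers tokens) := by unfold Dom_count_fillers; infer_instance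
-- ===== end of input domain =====

-- B replaces A's index walk with variable skips by two independent linear passes
-- (singles count + adjacent ('you','know') pair count): simpler decomposition, same cost.


-- ===== PORT A =====
def fillerWords : List String := ["um", "uh", "uhm", "umm", "erm", "hmm", "like"]

-- A's while-loop: index i advances by 1 (or by 2 after a 'you know' match)
def countLoop (tokens : List String) (fillerCount : Int) (i : Nat) : Int :=
  if h : i < tokens.length then
    let token := tokens[i]
    if token ∈ fillerWords then
      countLoop tokens (fillerCount + 1) (i + 1)
    else if token = "you" ∧ i + 1 < tokens.length ∧ tokens[i + 1]? = some "know" then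
      countLoop tokens (fillerCount + 1) (i + 2)
    else
      countLoop tokens fillerCount (i + 1)
  else fillerCount
termination_by tokens.length - i

def count_fillers (tokens : List String) : Int × Int :=
  (countLoop tokens 0 0, (tokens.length : Int))

-- ===== PORT B =====
def count_fillers_alt (tokens : List String) : Int × Int :=
  let singles : Int := ((tokens.filter (fun t => t ∈ fillerWords)).length : Int)
  let bigrams : Int := (((tokens.zip tokens.tail).filter (fun p => p = ("you", "know"))).length : Int)
  (singles + bigrams, (tokens.length : Int))

-- ===== PRECONDITION & SPEC =====
def Spec_count_fillers (tokens : List String) (out : Int × Int) : Prop := out = count_fillers_alt tokens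
instance (tokens : List String) (out : Int × Int) : Decidable (Spec_count_fillers tokens out) := by unfold Spec_count_fillers; infer_instance

-- ===== CLAIM (what is proved, stated in full; the proofs are below) =====
def Claim_equal_count_fillers : Prop := ∀ (tokens : List String), Dom_count_fillers tokens → Spec_count_fillers tokens (count_fillers tokens)

-- ===== LEMMAS AND PROOFS =====

-- B's two counts, as a single function of the remaining suffix
def gCount (l : List String) : Int :=
  ((l.filter (fun t => t ∈ fillerWords)).length : Int)
  + (((l.zip l.tail).filter (fun p => p = ("you", "know"))).length : Int)

theorem gCount_cons (x : String) (rest : List String) :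
    gCount (x :: rest)
      = (if x ∈ fillerWords then 1 else 0)
        + (if rest.head? = some "know" ∧ x = "you" then 1 else 0)
        + gCount rest := by
  unfold gCount
  cases rest with
  | nil => simp; split_ifs <;> simp_all
  | cons y ys =>
      simp only [List.tail_cons, List.zip_cons_cons, List.filter_cons, List.head?_cons]
      split_ifs with h1 h2 h3 h4 h5 h6 h7 <;>
        simp_all [Prod.ext_iff] <;> ring

theorem countLoop_eq (tokens : List String) :
    ∀ n i c, tokens.length - i ≤ n →
      countLoop tokens c i = c + gCount (tokens.drop i) := by
  intro n
  induction n with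
  | zero =>
      intro i c h
      have hi : tokens.length ≤ i := by omega
      rw [countLoop]
      simp [Nat.not_lt.mpr hi, List.drop_eq_nil_of_le hi, gCount]
  | succ n ih =>
      intro i c h
      rw [countLoop]
      by_cases hi : i < tokens.length
      · have hdrop : tokens.drop i = tokens[i] :: tokens.drop (i + 1) :=
          List.drop_eq_getElem_cons hi
        simp only [hi, dif_pos]
        by_cases hf : tokens[i] ∈ fillerWords
        · rw [if_pos hf, ih (i+1) (c+1) (by omega), hdrop, gCount_cons]
          have hy : tokens[i] ≠ "you" := by
            intro he; rw [he] at hf; simp [fillerWords] at hf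
          simp [hf, hy]; ring
        · rw [if_neg hf]
          by_cases hyk : tokens[i] = "you" ∧ i + 1 < tokens.length ∧ tokens[i+1]? = some "know"
          · rw [if_pos hyk]
            obtain ⟨hy, hlt, hk⟩ := hyk
            have hdrop2 : tokens.drop (i+1) = tokens[i+1] :: tokens.drop (i + 2) :=
              List.drop_eq_getElem_cons hlt
            have hk' : tokens[i+1] = "know" := by
              have := List.getElem?_eq_getElem hlt
              rw [this] at hk; exact Option.some.inj hk
            rw [ih (i+2) (c+1) (by omega), hdrop, hdrop2, gCount_cons, gCount_cons]
            have hkf : ("know" : String) ∉ fillerWords := by decide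
            have hkn : ("know" : String) ≠ "you" := by decide
            have hyf : ("you" : String) ∉ fillerWords := by decide
            simp [List.head?_cons, hy, hk', hyf, hkf, hkn]
            ring
          · rw [if_neg hyk, ih (i+1) c (by omega), hdrop, gCount_cons, List.head?_drop]
            have hno : ¬ (tokens[i+1]? = some "know" ∧ tokens[i] = "you") := by
              intro ⟨hk, hy⟩
              exact hyk ⟨hy, (List.getElem?_eq_some_iff.mp hk).1, hk⟩
            simp [hf, hno]
      · simp [hi, List.drop_eq_nil_of_le (by omega : tokens.length ≤ i), gCount]

-- ===== VERDICT (by name: the statement is the Claim_ definition above) =====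
theorem count_fillers_spec : Claim_equal_count_fillers := by
  intro tokens _
  unfold Spec_count_fillers count_fillers count_fillers_alt
  have h := countLoop_eq tokens tokens.length 0 0 (by omega)
  simp only [List.drop_zero] at h
  rw [h]
  unfold gCount
  simp
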